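-- pv_equiv track=rewrite | github.com/DecBayComp/TRamWAy | tramway/analyzer/env/environments.py | filter_script_content
-- ===== SOURCE A (Python) =====
-- def filter_script_content(content):
--     r"""
--     Processes the script content for its dispatch onto the worker side.
--
--     Arguments:
--
--         content (*list* of *str*): lines with the :const:`'\n'` character at the end of each line
--
--     Returns:
--
--         *list* of *str*: modified lines
--
--     """
--     filtered_content = []
--     for line in content:
--         if line.startswith('#'):
--             pass
--         elif line.startswith('get_ipython('):
--             continue
--         elif '.run()' in line:
--             # last line
--             filtered_content.append(line)
--             break
--         filtered_content.append(line)
--     return filtered_content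
-- ===== SOURCE B (Python) =====
-- def filter_script_content(content):
--     def cuts(line):
--         return (not line.startswith('#')
--                 and not line.startswith('get_ipython(')
--                 and '.run()' in line)
--     k = next((i for i, line in enumerate(content) if cuts(line)), None)
--     head = content if k is None else content[:k + 1]
--     return [line for line in head
--             if line.startswith('#') or not line.startswith('get_ipython(')]
-- ===== Notes on version B (the rewrite author's own statement) =====
-- stated objective: alternative
-- what changed: Replaces A's single fused loop with continue/break by a two-pass decomposition: first find the inclusive cutoff index (first non-comment, non-get_ipython line containing '.run()'), then filter the head slice, dropping only non-comment get_ipython( lines.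
import Mathlib
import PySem

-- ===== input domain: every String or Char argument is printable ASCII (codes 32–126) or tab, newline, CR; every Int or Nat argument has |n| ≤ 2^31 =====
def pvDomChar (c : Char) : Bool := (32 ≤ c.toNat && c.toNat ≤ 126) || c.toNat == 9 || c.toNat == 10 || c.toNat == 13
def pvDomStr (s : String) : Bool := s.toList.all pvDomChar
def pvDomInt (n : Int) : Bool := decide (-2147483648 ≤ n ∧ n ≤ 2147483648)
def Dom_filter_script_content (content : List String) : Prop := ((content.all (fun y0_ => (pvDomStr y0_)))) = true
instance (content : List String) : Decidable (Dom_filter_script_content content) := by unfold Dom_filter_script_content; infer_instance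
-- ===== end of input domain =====

-- B replaces A's fused loop (with continue/break) by a cutoff-finding pass plus a filtering pass; objective: alternative decomposition.

-- ===== PORT A =====
-- literal transliteration of A's single loop: '#' lines pass through, get_ipython( lines are skipped,
-- the first remaining line containing '.run()' is appended and the loop breaks.
def filter_script_content (content : List String) : List String :=
  match content with
  | [] => []
  | line :: rest =>
    if PySem.Str.startswith line "#" then line :: filter_script_content rest
    else if PySem.Str.startswith line "get_ipython(" then filter_script_content rest
    else if PySem.Str.isIn ".run()" line then [line]
    else line :: filter_script_content rest

-- ===== PORT B =====
-- cutoff predicate: a non-comment, non-get_ipython line containing '.run()'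
def pvCuts (line : String) : Bool :=
  !PySem.Str.startswith line "#" && !PySem.Str.startswith line "get_ipython(" &&
    PySem.Str.isIn ".run()" line

def filter_script_content_alt (content : List String) : List String :=
  let head := match content.findIdx? pvCuts with
    | none => content
    | some k => content.take (k + 1)
  head.filter (fun line =>
    PySem.Str.startswith line "#" || !PySem.Str.startswith line "get_ipython(")

-- ===== PRECONDITION & SPEC =====
def Spec_filter_script_content (content : List String) (out : List String) : Prop := out = filter_script_content_alt content
instance (content : List String) (out : List String) : Decidable (Spec_filter_script_content content out) := by unfold Spec_filter_script_content; infer_instance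

-- ===== CLAIM (what is proved, stated in full; the proofs are below) =====
def Claim_equal_filter_script_content : Prop := ∀ (content : List String), Dom_filter_script_content content → Spec_filter_script_content content (filter_script_content content)

-- ===== LEMMAS AND PROOFS =====

theorem alt_cons (line : String) (rest : List String) :
    filter_script_content_alt (line :: rest) =
      (if PySem.Str.startswith line "#" || !PySem.Str.startswith line "get_ipython("
        then [line] else []) ++
      (if pvCuts line then [] else filter_script_content_alt rest) := by
  by_cases h : pvCuts line = true
  · simp [filter_script_content_alt, List.findIdx?_cons, h]
    have h' := h
    unfold pvCuts at h'
    simp at h'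
    simp [h'.1.2]
  · replace h : pvCuts line = false := by revert h; cases pvCuts line <;> simp
    cases hk : List.findIdx? pvCuts rest with
    | none =>
      simp [filter_script_content_alt, List.findIdx?_cons, h, hk, List.filter_cons]
      split <;> simp
    | some k =>
      simp [filter_script_content_alt, List.findIdx?_cons, h, hk, List.filter_cons]
      split <;> simp

theorem eq_all (content : List String) :
    filter_script_content content = filter_script_content_alt content := by
  induction content with
  | nil => rfl
  | cons line rest ih =>
    rw [alt_cons]
    by_cases h1 : PySem.Chars.startswith line.toList ['#'] = true
    · have hc : pvCuts line = false := by unfold pvCuts; simp [h1]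
      simp [filter_script_content, h1, hc, ih]
    · replace h1 : PySem.Chars.startswith line.toList ['#'] = false := by
        revert h1; cases PySem.Chars.startswith line.toList ['#'] <;> simp
      by_cases h2 : PySem.Chars.startswith line.toList
          ['g', 'e', 't', '_', 'i', 'p', 'y', 't', 'h', 'o', 'n', '('] = true
      · have hc : pvCuts line = false := by unfold pvCuts; simp [h2]
        simp [filter_script_content, h1, h2, hc, ih]
      · replace h2 : PySem.Chars.startswith line.toList
            ['g', 'e', 't', '_', 'i', 'p', 'y', 't', 'h', 'o', 'n', '('] = false := by
          revert h2
          cases PySem.Chars.startswith line.toList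
            ['g', 'e', 't', '_', 'i', 'p', 'y', 't', 'h', 'o', 'n', '('] <;> simp
        by_cases h3 : PySem.Chars.isIn ['.', 'r', 'u', 'n', '(', ')'] line.toList = true
        · have hc : pvCuts line = true := by unfold pvCuts; simp [h1, h2, h3]
          simp [filter_script_content, h1, h2, h3, hc]
        · replace h3 : PySem.Chars.isIn ['.', 'r', 'u', 'n', '(', ')'] line.toList = false := by
            revert h3; cases PySem.Chars.isIn ['.', 'r', 'u', 'n', '(', ')'] line.toList <;> simp
          have hc : pvCuts line = false := by unfold pvCuts; simp [h3]
          simp [filter_script_content, h1, h2, h3, hc, ih]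

-- ===== VERDICT (by name: the statement is the Claim_ definition above) =====
theorem filter_script_content_spec : Claim_equal_filter_script_content := by
  intro content _
  exact eq_all content
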